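-- pv_equiv track=rewrite | github.com/dohyeonghan/algo_study | hanuel/[0625]1292.py | n_sum
-- ===== SOURCE A (Python) =====
-- def n_sum(n):
--     sum=0
--     target=1
--     cnt=0
--     for _ in range(n):
--         if (cnt==target):
--             target += 1
--             cnt = 0
--         cnt += 1
--         sum += target
--     return sum
-- ===== SOURCE B (Python) =====
-- def n_sum(n):
--     if n <= 0:
--         return 0
--     k = 0
--     while (k + 1) * (k + 2) // 2 <= n:
--         k += 1
--     return k * (k + 1) * (2 * k + 1) // 6 + (n - k * (k + 1) // 2) * (k + 1)
-- ===== Notes on version B (the rewrite author's own statement) =====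
-- stated objective: faster
-- what changed: Replaces the per-term loop by an O(sqrt(n)) search for the last complete block of the staircase sequence, then sums in closed form with the square-pyramidal and triangular-number formulas.
import Mathlib
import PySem

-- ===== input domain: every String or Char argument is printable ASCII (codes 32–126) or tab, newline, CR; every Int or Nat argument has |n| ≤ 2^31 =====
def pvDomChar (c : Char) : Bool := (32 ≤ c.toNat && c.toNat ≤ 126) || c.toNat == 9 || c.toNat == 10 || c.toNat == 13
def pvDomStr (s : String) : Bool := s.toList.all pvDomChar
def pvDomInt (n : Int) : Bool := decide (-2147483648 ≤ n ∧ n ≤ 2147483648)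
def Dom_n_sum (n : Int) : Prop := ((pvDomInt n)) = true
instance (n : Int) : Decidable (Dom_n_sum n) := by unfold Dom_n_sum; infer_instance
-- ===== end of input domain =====

-- B replaces A's per-term loop by an O(sqrt n) block search plus closed-form block sums (exact same return value).


-- ===== PORT A =====
-- one iteration of A's for-body, on the state (sum, target, cnt)
def stepA (st : Int × Int × Int) : Int × Int × Int :=
  let (sum, target, cnt) := st
  let (target, cnt) := if cnt == target then (target + 1, (0 : Int)) else (target, cnt)
  let cnt := cnt + 1
  let sum := sum + target
  (sum, target, cnt)

def n_sum (n : Int) : Int :=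
  ((PySem.List.pyRange 0 n 1).foldl (fun st _ => stepA st) ((0 : Int), (1 : Int), (0 : Int))).1

-- ===== PORT B =====
-- termination helper for the while loop: the loop counter stays below n
theorem findk_step_le (k : Nat) : k + 1 ≤ (k + 1) * (k + 2) / 2 :=
  (Nat.le_div_iff_mul_le (by norm_num)).mpr (Nat.mul_le_mul_left _ (by omega))

-- the while loop: smallest k with (k+1)*(k+2)//2 > n
def findk_n_sum (n : Int) (k : Nat) : Nat :=
  if (((k + 1) * (k + 2) / 2 : Nat) : Int) ≤ n then findk_n_sum n (k + 1) else k
termination_by n.toNat - k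
decreasing_by
  have h0 : ((k + 1 : Nat) : Int) ≤ (((k + 1) * (k + 2) / 2 : Nat) : Int) := by
    exact_mod_cast findk_step_le k
  have h1 : ((k + 1 : Nat) : Int) ≤ n := le_trans h0 (by assumption)
  omega

def n_sum_alt (n : Int) : Int :=
  if n ≤ 0 then 0
  else
    let k := findk_n_sum n 0
    ((k * (k + 1) * (2 * k + 1) / 6 : Nat) : Int)
      + (n - ((k * (k + 1) / 2 : Nat) : Int)) * ((k : Int) + 1)

-- ===== PRECONDITION & SPEC =====
def Spec_n_sum (n : Int) (out : Int) : Prop := out = n_sum_alt n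
instance (n : Int) (out : Int) : Decidable (Spec_n_sum n out) := by unfold Spec_n_sum; infer_instance

-- ===== CLAIM (what is proved, stated in full; the proofs are below) =====
def Claim_equal_n_sum : Prop := ∀ (n : Int), Dom_n_sum n → Spec_n_sum n (n_sum n)

-- ===== LEMMAS AND PROOFS =====

-- A's fold ignores the list elements: it is an iterate of stepA
theorem foldl_stepA (l : List Int) (st : Int × Int × Int) :
    l.foldl (fun st _ => stepA st) st = stepA^[l.length] st := by
  induction l generalizing st with
  | nil => rfl
  | cons x xs ih => simp [List.foldl, ih, Function.iterate_succ_apply]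

theorem stepA_eq_pos (s t c : Int) (h : c = t) :
    stepA (s, t, c) = (s + (t + 1), t + 1, (1 : Int)) := by simp [stepA, h]

theorem stepA_eq_neg (s t c : Int) (h : c ≠ t) :
    stepA (s, t, c) = (s + t, t, c + 1) := by simp [stepA, h]

-- invariant of A's loop state after m iterations: t is the current block value, c the
-- position inside the block, and s the running sum (divisions cleared by 2 and 6)
def InvA (m : Nat) (st : Int × Int × Int) : Prop :=
  1 ≤ st.2.1 ∧ 0 ≤ st.2.2 ∧ st.2.2 ≤ st.2.1 ∧
  2 * (m : Int) = (st.2.1 - 1) * st.2.1 + 2 * st.2.2 ∧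
  6 * st.1 = (st.2.1 - 1) * st.2.1 * (2 * st.2.1 - 1) + 6 * st.2.2 * st.2.1 ∧
  (m = 0 ∨ 1 ≤ st.2.2)

theorem stepA_inv (m : Nat) (st : Int × Int × Int) (h : InvA m st) : InvA (m + 1) (stepA st) := by
  obtain ⟨s, t, c⟩ := st
  dsimp only [InvA] at h
  obtain ⟨h1, h2, h3, h4, h5, _⟩ := h
  by_cases hc : c = t
  · subst hc
    rw [stepA_eq_pos s c c rfl]
    dsimp only [InvA]
    refine ⟨by omega, by norm_num, by omega, ?_, ?_, by norm_num⟩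
    · push_cast; linear_combination h4
    · linear_combination h5
  · rw [stepA_eq_neg s t c hc]
    dsimp only [InvA]
    refine ⟨h1, by omega, by omega, ?_, ?_, by omega⟩
    · push_cast; linear_combination h4
    · linear_combination h5

theorem invA (m : Nat) : InvA m (stepA^[m] ((0 : Int), (1 : Int), (0 : Int))) := by
  induction m with
  | zero => simp [InvA]
  | succ m ih => rw [Function.iterate_succ_apply']; exact stepA_inv m _ ih

-- findk bracket: if T(k) ≤ n then the result r satisfies T(r) ≤ n < T(r+1)
theorem findk_bracket (n : Int) (k : Nat) (h : ((k * (k + 1) / 2 : Nat) : Int) ≤ n) :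
    ((findk_n_sum n k * (findk_n_sum n k + 1) / 2 : Nat) : Int) ≤ n ∧
      n < (((findk_n_sum n k + 1) * (findk_n_sum n k + 2) / 2 : Nat) : Int) := by
  fun_induction findk_n_sum n k with
  | case1 k hle ih => exact ih (by exact_mod_cast hle)
  | case2 k hgt => exact ⟨h, by omega⟩

-- exact divisibility facts
theorem two_dvd_tri (k : Nat) : k * (k + 1) / 2 * 2 = k * (k + 1) :=
  Nat.div_mul_cancel (Nat.even_mul_succ_self k).two_dvd

theorem six_dvd_pyr (k : Nat) : 6 ∣ k * (k + 1) * (2 * k + 1) := by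
  induction k with
  | zero => decide
  | succ k ih =>
    obtain ⟨c, hc⟩ := ih
    refine ⟨c + (k + 1) * (k + 1), ?_⟩
    have h : (k + 1) * (k + 1 + 1) * (2 * (k + 1) + 1)
        = k * (k + 1) * (2 * k + 1) + 6 * ((k + 1) * (k + 1)) := by ring
    rw [h, hc]; ring

theorem six_pyr (k : Nat) : k * (k + 1) * (2 * k + 1) / 6 * 6 = k * (k + 1) * (2 * k + 1) :=
  Nat.div_mul_cancel (six_dvd_pyr k)

-- the block index with T(k) ≤ 2n < T(k+1) (doubled form) is unique
theorem block_unique (a b N : Int) (ha : 0 ≤ a) (hb : 0 ≤ b)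
    (h1 : a * (a + 1) ≤ 2 * N) (h2 : 2 * N < (a + 1) * (a + 2))
    (h3 : b * (b + 1) ≤ 2 * N) (h4 : 2 * N < (b + 1) * (b + 2)) : a = b := by
  rcases lt_trichotomy a b with h | h | h
  · exfalso; nlinarith
  · exact h
  · exfalso; nlinarith

-- ===== VERDICT (by name: the statement is the Claim_ definition above) =====
theorem n_sum_spec : Claim_equal_n_sum := by
  intro n _
  unfold Spec_n_sum n_sum n_sum_alt
  by_cases hn : n ≤ 0
  · rw [PySem.List.pyRange_one_eq_nil hn]
    simp [hn]
  · simp only [if_neg hn]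
    rw [not_le] at hn
    rw [foldl_stepA, PySem.List.length_pyRange_one]
    have hinv := invA (n - 0).toNat
    rcases hst : stepA^[(n - 0).toNat] ((0 : Int), (1 : Int), (0 : Int)) with ⟨s, t, c⟩
    rw [hst] at hinv
    obtain ⟨h1, h2, h3, h4, h5, h6⟩ := hinv
    simp only at h1 h2 h3 h4 h5 h6 ⊢
    have hmn : ((n - 0).toNat : Int) = n := by omega
    rw [hmn] at h4
    have hc1 : (1 : Int) ≤ c := by
      rcases h6 with h6 | h6
      · exfalso; omega
      · exact h6
    set k := findk_n_sum n 0 with hk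
    have hbr := findk_bracket n 0 (by norm_num; omega)
    rw [← hk] at hbr
    set T : Int := ((k * (k + 1) / 2 : Nat) : Int) with hT
    set Q : Int := ((k * (k + 1) * (2 * k + 1) / 6 : Nat) : Int) with hQ
    set K : Int := (k : Int) with hK
    have hT2 : T * 2 = K * (K + 1) := by
      rw [hT, hK]; exact_mod_cast congrArg (Nat.cast : Nat → Int) (two_dvd_tri k)
    have hT2' : (((k + 1) * (k + 2) / 2 : Nat) : Int) * 2 = (K + 1) * (K + 2) := by
      rw [hK]; exact_mod_cast congrArg (Nat.cast : Nat → Int) (two_dvd_tri (k + 1))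
    have hQ6 : Q * 6 = K * (K + 1) * (2 * K + 1) := by
      rw [hQ, hK]; exact_mod_cast congrArg (Nat.cast : Nat → Int) (six_pyr k)
    have hK0 : (0 : Int) ≤ K := by rw [hK]; positivity
    have hlo : K * (K + 1) ≤ 2 * n := by
      rw [← hT2]; linarith [hbr.1]
    have hhi : 2 * n < (K + 1) * (K + 2) := by
      rw [← hT2']; linarith [hbr.2]
    by_cases hc : c = t
    · -- the last block is exactly complete: K = t
      subst hc
      have hKt : K = c := by
        apply block_unique K c n hK0 (by omega) hlo hhi
        · linarith [h4]
        · linarith [h4, hc1]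
      rw [hKt] at hT2 hQ6 ⊢
      have hnT : n - T = 0 := by linarith [h4, hT2]
      have key : 6 * s = 6 * (Q + (n - T) * (c + 1)) := by
        linear_combination h5 - hQ6 - 6 * (c + 1) * hnT
      linarith [key]
    · -- inside a block: K = t - 1
      have hct : c < t := lt_of_le_of_ne h3 hc
      have hKt : K = t - 1 := by
        apply block_unique K (t - 1) n hK0 (by omega) hlo hhi
        · linarith [h4, h2]
        · linarith [h4, hct]
      rw [hKt] at hT2 hQ6 ⊢
      have hnT : n - T = c := by linarith [h4, hT2]
      have key : 6 * s = 6 * (Q + (n - T) * t) := by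
        linear_combination h5 - hQ6 - 6 * t * hnT
      linarith [key]
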